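-- pv_equiv track=rewrite | github.com/leeyeaeun/codetree_ | 260225/1이 되는 순간까지/until-the-moment-I-reach-one.py | f
-- ===== SOURCE A (Python) =====
-- def f(n):
--     num = 0
--     if n == 1:
--         return 0
--
--     if n %2 == 0:
--         return 1 + f(n//2)
--     else:
--         return 1 + f(n//3)
-- ===== SOURCE B (Python) =====
-- def step(n):
--     return n // 2 if n % 2 == 0 else n // 3
--
-- def f(n):
--     path = [n]
--     while path[-1] != 1:
--         path.append(step(path[-1]))
--     return len(path) - 1
-- ===== Notes on version B (the rewrite author's own statement) =====
-- stated objective: alternative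
-- what changed: Instead of A's recursion adding 1 per call, B materialises the whole division trajectory as a list via a step helper and returns its length minus one.
import Mathlib
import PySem

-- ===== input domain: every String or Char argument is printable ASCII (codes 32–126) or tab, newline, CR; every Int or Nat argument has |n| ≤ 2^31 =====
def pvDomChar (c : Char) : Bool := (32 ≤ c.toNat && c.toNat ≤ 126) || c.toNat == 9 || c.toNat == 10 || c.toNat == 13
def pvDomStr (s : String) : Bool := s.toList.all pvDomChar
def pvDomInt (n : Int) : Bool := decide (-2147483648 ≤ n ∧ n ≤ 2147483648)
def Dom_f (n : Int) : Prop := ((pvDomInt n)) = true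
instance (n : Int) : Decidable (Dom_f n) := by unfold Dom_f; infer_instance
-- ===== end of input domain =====

-- B replaces A's "1 + recursive call" counting by building the whole division trajectory as a list and returning its length minus one (alternative decomposition; return value only).

-- ===== PORT A =====
-- A's recursion; the fuel argument only makes the same recursion total (n.toNat suffices for all n ≥ 1).
def fAux : Nat → Int → Int
  | 0, _ => 0
  | fuel + 1, n =>
    if n = 1 then 0
    else if PySem.Int.mod n 2 = 0 then 1 + fAux fuel (PySem.Int.floordiv n 2)
    else 1 + fAux fuel (PySem.Int.floordiv n 3)

def f (n : Int) : Int := fAux n.toNat n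

-- ===== PORT B =====
-- B's step helper and trajectory list; same fuel guard for totality of the while-loop.
def stepB (n : Int) : Int :=
  if PySem.Int.mod n 2 = 0 then PySem.Int.floordiv n 2 else PySem.Int.floordiv n 3

def pathB : Nat → Int → List Int
  | 0, n => [n]
  | fuel + 1, n => if n = 1 then [n] else n :: pathB fuel (stepB n)

def f_alt (n : Int) : Int := ((pathB n.toNat n).length : Int) - 1

-- ===== PRECONDITION & SPEC =====
-- Pre_ excludes n ≤ 0, where Python A never reaches 1 and raises RecursionError (and B loops forever).
def Pre_f (n : Int) : Prop := 1 ≤ n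
instance (n : Int) : Decidable (Pre_f n) := by unfold Pre_f; infer_instance
def pvWitness_f : Int := 12

def Spec_f (n : Int) (out : Int) : Prop := out = f_alt n
instance (n : Int) (out : Int) : Decidable (Spec_f n out) := by unfold Spec_f; infer_instance

-- ===== CLAIM =====
def Claim_equal_f : Prop := ∀ (n : Int), Dom_f n → Pre_f n → Spec_f n (f n)

-- ===== LEMMAS AND PROOFS =====
theorem pathB_length (fuel : Nat) : ∀ (n : Int), ((pathB fuel n).length : Int) = 1 + fAux fuel n := by
  induction fuel with
  | zero => intro n; simp [pathB, fAux]
  | succ k ih =>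
    intro n
    simp only [pathB, fAux, stepB]
    split_ifs with h1 h2
    · simp
    · simp [ih]; ring
    · simp [ih]; ring

-- ===== VERDICT =====
theorem f_spec : Claim_equal_f := by
  intro n _ _
  unfold Spec_f f f_alt
  rw [pathB_length]
  ring
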